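-- pv_equiv track=rewrite | github.com/boostcampwm-2021-iOS10-Jipjung/Study-Algorithm | S034/211213/메뉴_리뉴얼.py | get_max_selected_combinations
-- ===== SOURCE A (Python) =====
-- def get_max_selected_combinations(combination_count_dict):
--     result = []
--     if len(combination_count_dict) == 0:
--         return result
--     combination_count_items = sorted(combination_count_dict.items(), key = lambda x: -x[1])
--     max_value = combination_count_items[0][1]
--     for item in combination_count_items:
--         if item[1] == max_value and max_value >= 2:
--             result.append(item[0])
--         else:
--             break
--     return result
-- ===== SOURCE B (Python) =====
-- def get_max_selected_combinations(combination_count_dict):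
--     # One pass: take the max count, then collect keys with that count in insertion order (no sort).
--     if not combination_count_dict:
--         return []
--     max_value = max(combination_count_dict.values())
--     if max_value < 2:
--         return []
--     return [k for k, v in combination_count_dict.items() if v == max_value]
-- ===== Notes on version B (the rewrite author's own statement) =====
-- stated objective: faster
-- what changed: Replaced sort-by-descending-count plus break-loop with a single max() pass followed by a filter of keys equal to the max, relying on the sort's stability guaranteeing insertion order among ties.
import Mathlib
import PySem

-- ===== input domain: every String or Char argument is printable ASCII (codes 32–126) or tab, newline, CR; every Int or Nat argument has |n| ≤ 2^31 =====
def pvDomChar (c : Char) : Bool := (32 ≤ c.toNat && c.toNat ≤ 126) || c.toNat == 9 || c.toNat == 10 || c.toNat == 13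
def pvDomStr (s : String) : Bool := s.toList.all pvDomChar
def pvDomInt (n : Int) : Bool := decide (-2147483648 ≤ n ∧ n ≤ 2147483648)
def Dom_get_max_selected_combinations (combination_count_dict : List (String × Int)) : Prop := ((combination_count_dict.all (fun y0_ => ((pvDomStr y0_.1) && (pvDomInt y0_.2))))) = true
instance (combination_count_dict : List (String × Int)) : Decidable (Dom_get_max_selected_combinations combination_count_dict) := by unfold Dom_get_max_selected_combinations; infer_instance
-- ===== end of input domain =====

-- B replaces A's sort-by-descending-count + break-loop with one max() pass and a filter (same return values).


-- ===== PORT A =====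
-- the 'for item in …: if …: result.append(item[0]) else: break' loop of A
def pvALoop (items : List (String × Int)) (max_value : Int) (result : List String) : List String :=
  match items with
  | [] => result
  | item :: rest =>
      if item.2 = max_value ∧ 2 ≤ max_value then pvALoop rest max_value (result ++ [item.1])
      else result

def get_max_selected_combinations (combination_count_dict : List (String × Int)) : List String :=
  if combination_count_dict.length = 0 then []
  else
    match PySem.List.sorted combination_count_dict (fun x => -x.2) false with
    | [] => []   -- unreachable: sorted of a nonempty list is nonempty
    | m :: t => pvALoop (m :: t) m.2 []

-- ===== PORT B =====
def get_max_selected_combinations_alt (combination_count_dict : List (String × Int)) : List String :=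
  match combination_count_dict.map Prod.snd with
  | [] => []
  | v :: vs =>
      let max_value := vs.foldl max v          -- max(d.values())
      if max_value < 2 then []
      else (combination_count_dict.filter (fun p => p.2 == max_value)).map Prod.fst

-- ===== PRECONDITION & SPEC =====
def Spec_get_max_selected_combinations (combination_count_dict : List (String × Int)) (out : List String) : Prop := out = get_max_selected_combinations_alt combination_count_dict
instance (combination_count_dict : List (String × Int)) (out : List String) : Decidable (Spec_get_max_selected_combinations combination_count_dict out) := by unfold Spec_get_max_selected_combinations; infer_instance

-- ===== CLAIM (what is proved, stated in full; the proofs are below) =====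
def Claim_equal_get_max_selected_combinations : Prop := ∀ (combination_count_dict : List (String × Int)), Dom_get_max_selected_combinations combination_count_dict → Spec_get_max_selected_combinations combination_count_dict (get_max_selected_combinations combination_count_dict)

-- ===== LEMMAS AND PROOFS =====

-- inserting a into any list whose keys are all ≥ c (with c ≤ key a) extends the key-=-c prefix iff key a = c
theorem pv_insertBy_takeWhile {α : Type} (key : α → Int) (L : List α) (a : α) (c : Int)
    (hL : ∀ y ∈ L, c ≤ key y) (ha : c ≤ key a) :
    (PySem.List.insertBy (fun x y => decide (key x < key y)) a L).takeWhile (fun p => decide (key p = c))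
      = L.takeWhile (fun p => decide (key p = c)) ++ (if key a = c then [a] else []) := by
  induction L with
  | nil =>
      by_cases hac : key a = c <;> simp [PySem.List.insertBy, List.takeWhile, hac]
  | cons y ys ih =>
      have hy : c ≤ key y := hL y (List.mem_cons_self)
      have hys : ∀ z ∈ ys, c ≤ key z := fun z hz => hL z (List.mem_cons_of_mem _ hz)
      by_cases hlt : key a < key y
      · have hyne : key y ≠ c := by omega
        simp [PySem.List.insertBy, hlt, List.takeWhile, hyne]
        by_cases hac : key a = c <;> simp [hac]
      · by_cases hyc : key y = c
        · have hlt' : ¬ key a < c := hyc ▸ hlt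
          simp [PySem.List.insertBy, hlt', List.takeWhile, hyc, ih hys]
        · have hac : key a ≠ c := by
            have : c < key y := lt_of_le_of_ne hy (Ne.symm hyc)
            omega
          simp [PySem.List.insertBy, hlt, List.takeWhile, hyc, hac]

-- stability of the insertion-sort fold: the prefix of minimal-key elements is the filter of the input
theorem pv_sorted_takeWhile_eq_filter {α : Type} (key : α → Int) (xs : List α) (c : Int)
    (h : ∀ x ∈ xs, c ≤ key x) :
    (PySem.List.sorted xs key false).takeWhile (fun p => decide (key p = c))
      = xs.filter (fun p => decide (key p = c)) := by
  rw [PySem.List.sorted_eq_foldl_insertBy]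
  induction xs using List.reverseRecOn with
  | nil => simp
  | append_singleton xs a ih =>
      have hxs : ∀ x ∈ xs, c ≤ key x := fun x hx => h x (List.mem_append_left _ hx)
      have ha : c ≤ key a := h a (List.mem_append_right _ (List.mem_singleton_self a))
      rw [List.foldl_append]
      simp only [List.foldl_cons, List.foldl_nil]
      have hmem : ∀ y ∈ (List.foldl (fun acc x => PySem.List.insertBy (fun x y => decide (key x < key y)) x acc) [] xs), c ≤ key y := by
        intro y hy
        have hp : (List.foldl (fun acc x => PySem.List.insertBy (fun x y => decide (key x < key y)) x acc) [] xs).Perm xs := by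
          rw [← PySem.List.sorted_eq_foldl_insertBy]
          exact PySem.List.sorted_perm xs key false
        exact hxs y (hp.mem_iff.mp hy)
      rw [pv_insertBy_takeWhile key _ a c hmem ha, ih hxs, List.filter_append]
      by_cases hac : key a = c <;> simp [hac]

-- A's loop, with 2 ≤ max_value, is takeWhile-then-map-fst
theorem pv_aLoop_eq (items : List (String × Int)) (mv : Int) (acc : List String) (h2 : 2 ≤ mv) :
    pvALoop items mv acc = acc ++ (items.takeWhile (fun p => p.2 == mv)).map Prod.fst := by
  induction items generalizing acc with
  | nil => simp [pvALoop]
  | cons x rest ih =>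
      by_cases hx : x.2 = mv
      · simp [pvALoop, hx, h2, List.takeWhile, ih]
      · have hb : (x.2 == mv) = false := by simp [hx]
        simp [pvALoop, hx, List.takeWhile, hb]

-- A's loop without 2 ≤ max_value returns the accumulator
theorem pv_aLoop_lt (items : List (String × Int)) (mv : Int) (acc : List String) (h2 : mv < 2) :
    pvALoop items mv acc = acc := by
  cases items with
  | nil => rfl
  | cons x rest => simp [pvALoop]; omega

-- the running max of the values equals the value at the head of the descending sort
theorem pv_head_sorted_is_max (d : List (String × Int)) (m : String × Int) (t : List (String × Int))
    (h : PySem.List.sorted d (fun x => -x.2) false = m :: t) (v : Int) (vs : List Int)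
    (hv : d.map Prod.snd = v :: vs) :
    vs.foldl max v = m.2 := by
  have hub : ∀ y ∈ d, y.2 ≤ m.2 := by
    intro y hy
    have hk := PySem.List.key_head_sorted_le d (fun x => -x.2) h y hy
    simp only at hk
    omega
  have hm : m ∈ d := (PySem.List.sorted_perm d (fun x => -x.2) false).mem_iff.mp (h ▸ List.mem_cons_self)
  have hub' : ∀ w ∈ v :: vs, w ≤ m.2 := by
    intro w hw
    rw [← hv] at hw
    obtain ⟨y, hy, rfl⟩ := List.mem_map.mp hw
    exact hub y hy
  have hle : vs.foldl max v ≤ m.2 := by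
    rcases PySem.List.foldl_max_mem vs v with hfe | hfm
    · rw [hfe]; exact hub' v List.mem_cons_self
    · exact hub' _ (List.mem_cons_of_mem _ hfm)
  have hge : m.2 ≤ vs.foldl max v := by
    have hmem : m.2 ∈ v :: vs := by
      rw [← hv]; exact List.mem_map.mpr ⟨m, hm, rfl⟩
    rcases List.mem_cons.mp hmem with he | hmem'
    · exact he ▸ (PySem.List.le_foldl_max vs v).1
    · exact (PySem.List.le_foldl_max vs v).2 _ hmem'
  omega

-- ===== VERDICT (by name: the statement is the Claim_ definition above) =====
theorem get_max_selected_combinations_spec : Claim_equal_get_max_selected_combinations := by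
  intro d _
  unfold Spec_get_max_selected_combinations get_max_selected_combinations get_max_selected_combinations_alt
  cases hd : d with
  | nil => simp
  | cons p dt =>
      have hdne : d ≠ [] := by simp [hd]
      rw [← hd]
      have hlen : ¬ d.length = 0 := by simp [hd]
      simp only [hlen, if_false]
      have hmapne : d.map Prod.snd ≠ [] := by simp [hd]
      obtain ⟨v, vs, hv⟩ := List.exists_cons_of_ne_nil hmapne
      have hsne : PySem.List.sorted d (fun x => -x.2) false ≠ [] := by
        intro hc
        rw [PySem.List.sorted_eq_nil_iff] at hc
        exact hdne hc
      obtain ⟨m, t, hs⟩ := List.exists_cons_of_ne_nil hsne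
      rw [hs, hv]
      have hmax : vs.foldl max v = m.2 := pv_head_sorted_is_max d m t hs v vs hv
      simp only [hmax]
      by_cases h2 : m.2 < 2
      · rw [pv_aLoop_lt _ _ _ h2]
        simp [h2]
      · rw [not_lt] at h2
        have h2' : ¬ m.2 < 2 := by omega
        rw [pv_aLoop_eq _ _ _ h2]
        simp only [h2', if_false, List.nil_append]
        have hall : ∀ x ∈ d, -m.2 ≤ -x.2 := by
          intro x hx
          have hk := PySem.List.key_head_sorted_le d (fun x => -x.2) hs x hx
          simp only at hk
          omega
        have hst := pv_sorted_takeWhile_eq_filter (fun x : String × Int => -x.2) d (-m.2) hall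
        rw [hs] at hst
        simp only at hst
        have hpred : (fun p : String × Int => p.2 == m.2) = (fun p : String × Int => decide (-p.2 = -m.2)) := by
          funext p
          by_cases h : p.2 = m.2
          · simp [h]
          · have h' : ¬ (-p.2 = -m.2) := by omega
            simp [h, h']
        rw [hpred, hst]
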